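-- pv_equiv track=rewrite | github.com/okekegodwinchisom/Chiscode.v2 | backend/app/services/preview_service.py | _find_html_entry
-- ===== SOURCE A (Python) =====
-- def _find_html_entry(file_tree: dict[str, str]) -> str | None:
--     for candidate in (
--         "index.html", "public/index.html", "dist/index.html",
--         "src/index.html", "static/index.html",
--     ):
--         if candidate in file_tree:
--             return candidate
--     for path in sorted(file_tree.keys()):
--         if path.endswith(".html") and "/" not in path:
--             return path
--     return None
-- ===== SOURCE B (Python) =====
-- _RANK = {
--     "index.html": 0, "public/index.html": 1, "dist/index.html": 2,
--     "src/index.html": 3, "static/index.html": 4,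
-- }
--
--
-- def _find_html_entry(file_tree: dict[str, str]) -> str | None:
--     best = None  # (rank, path) with the smallest key seen so far
--     for path in file_tree:
--         rank = _RANK.get(path)
--         if rank is None:
--             if path.endswith(".html") and "/" not in path:
--                 rank = 5
--             else:
--                 continue
--         if best is None or (rank, path) < best:
--             best = (rank, path)
--     return None if best is None else best[1]
-- ===== Notes on version B (the rewrite author's own statement) =====
-- stated objective: alternative
-- what changed: Replaced A's two sequential scans (early-return loop over the five preferred names, then a find over the sorted keys) by a single pass over the keys selecting the minimum under a computed priority key (preferred rank 0-4, top-level .html rank 5, path as tie-break), with no sort.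
import Mathlib
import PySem

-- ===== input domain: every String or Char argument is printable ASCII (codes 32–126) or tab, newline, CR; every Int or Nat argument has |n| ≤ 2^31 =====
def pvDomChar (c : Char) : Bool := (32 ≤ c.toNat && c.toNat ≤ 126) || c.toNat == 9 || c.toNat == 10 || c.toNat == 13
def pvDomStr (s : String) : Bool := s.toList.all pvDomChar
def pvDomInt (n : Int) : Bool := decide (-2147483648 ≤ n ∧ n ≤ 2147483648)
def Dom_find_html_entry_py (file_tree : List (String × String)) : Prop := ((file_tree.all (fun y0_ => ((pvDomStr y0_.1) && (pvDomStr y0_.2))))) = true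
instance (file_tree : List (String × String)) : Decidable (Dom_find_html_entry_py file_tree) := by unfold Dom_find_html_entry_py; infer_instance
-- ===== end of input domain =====

-- B replaces A's two sequential scans (preferred-name early-return loop, then a find over the
-- sorted keys) by ONE pass over the keys selecting the minimum under a computed priority key
-- (rank 0-4 for the preferred names, rank 5 for any other top-level .html, tie-broken by path);
-- objective: alternative decomposition (no sort; a single min-selection pass).

-- ===== PORT A =====
def pvCandidates : List String :=
  ["index.html", "public/index.html", "dist/index.html", "src/index.html", "static/index.html"]

def find_html_entry_py (file_tree : List (String × String)) : Option String :=
  let keys := file_tree.map Prod.fst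
  match pvCandidates.find? (fun c => keys.contains c) with
  | some c => some c
  | none =>
    (PySem.List.sorted keys (fun x => x)).find?
      (fun p => PySem.Str.endswith p ".html" && !PySem.Str.isIn "/" p)

-- ===== PORT B =====
def pvRankDict : List (String × Nat) :=
  [("index.html", 0), ("public/index.html", 1), ("dist/index.html", 2),
   ("src/index.html", 3), ("static/index.html", 4)]

-- _RANK.get(path): first-match lookup in the association list (the dict has distinct keys)
def pvRank? (p : String) : Option Nat :=
  match (pvRankDict.find? (fun kv => kv.1 == p)).map Prod.snd with
  | some r => some r
  | none =>
    if PySem.Str.endswith p ".html" && !PySem.Str.isIn "/" p then some 5 else none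

def pvStep (best : Option (Nat × String)) (path : String) : Option (Nat × String) :=
  match pvRank? path with
  | none => best
  | some r =>
    match best with
    | none => some (r, path)
    | some (br, bp) =>
      if r < br ∨ (r = br ∧ path < bp) then some (r, path) else some (br, bp)

def find_html_entry_py_alt (file_tree : List (String × String)) : Option String :=
  (((file_tree.map Prod.fst).foldl pvStep none).map Prod.snd)

-- ===== PRECONDITION & SPEC =====
def Spec_find_html_entry_py (file_tree : List (String × String)) (out : Option String) : Prop := out = find_html_entry_py_alt file_tree
instance (file_tree : List (String × String)) (out : Option String) : Decidable (Spec_find_html_entry_py file_tree out) := by unfold Spec_find_html_entry_py; infer_instance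

-- ===== CLAIM (what is proved, stated in full; the proofs are below) =====
def Claim_equal_find_html_entry_py : Prop := ∀ (file_tree : List (String × String)), Dom_find_html_entry_py file_tree → Spec_find_html_entry_py file_tree (find_html_entry_py file_tree)

-- ===== LEMMAS AND PROOFS =====

-- the "qualifies" predicate of A's second loop
def pvGood (p : String) : Bool := PySem.Str.endswith p ".html" && !PySem.Str.isIn "/" p

-- priority key of a path, as B computes it
def pvKey? (p : String) : Option (Nat × String) := (pvRank? p).map (fun r => (r, p))

-- lexicographic ≤ on (rank, path)
def pvLe (a b : Nat × String) : Prop := a.1 < b.1 ∨ (a.1 = b.1 ∧ a.2 ≤ b.2)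

lemma pvLe_refl (a : Nat × String) : pvLe a a := Or.inr ⟨rfl, le_refl _⟩

lemma pvLe_trans {a b c : Nat × String} (h1 : pvLe a b) (h2 : pvLe b c) : pvLe a c := by
  rcases h1 with h1 | ⟨h1, h1'⟩ <;> rcases h2 with h2 | ⟨h2, h2'⟩
  · exact Or.inl (lt_trans h1 h2)
  · exact Or.inl (h2 ▸ h1)
  · exact Or.inl (h1 ▸ h2)
  · exact Or.inr ⟨h1.trans h2, le_trans h1' h2'⟩

lemma pvLe_antisymm {a b : Nat × String} (h1 : pvLe a b) (h2 : pvLe b a) : a = b := by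
  rcases h1 with h1 | ⟨h1, h1'⟩ <;> rcases h2 with h2 | ⟨h2, h2'⟩
  · exact absurd h2 (by omega)
  · exact absurd h1 (by omega)
  · exact absurd h2 (by omega)
  · exact Prod.ext h1 (le_antisymm h1' h2')

lemma pvRank_get_none (p : String)
    (h0 : p ≠ "index.html") (h1 : p ≠ "public/index.html") (h2 : p ≠ "dist/index.html")
    (h3 : p ≠ "src/index.html") (h4 : p ≠ "static/index.html") :
    pvRank? p = if pvGood p then some 5 else none := by
  have b0 : (("index.html" : String) == p) = false := beq_eq_false_iff_ne.mpr (Ne.symm h0)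
  have b1 : (("public/index.html" : String) == p) = false := beq_eq_false_iff_ne.mpr (Ne.symm h1)
  have b2 : (("dist/index.html" : String) == p) = false := beq_eq_false_iff_ne.mpr (Ne.symm h2)
  have b3 : (("src/index.html" : String) == p) = false := beq_eq_false_iff_ne.mpr (Ne.symm h3)
  have b4 : (("static/index.html" : String) == p) = false := beq_eq_false_iff_ne.mpr (Ne.symm h4)
  unfold pvRank? pvRankDict pvGood
  simp [List.find?, b0, b1, b2, b3, b4]

-- which paths get which rank
lemma pvRank_cases (p : String) (r : Nat) (h : pvRank? p = some r) :
    (r = 0 ∧ p = "index.html") ∨ (r = 1 ∧ p = "public/index.html") ∨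
    (r = 2 ∧ p = "dist/index.html") ∨ (r = 3 ∧ p = "src/index.html") ∨
    (r = 4 ∧ p = "static/index.html") ∨ (r = 5 ∧ pvGood p = true) := by
  by_cases e0 : p = "index.html"
  · subst e0; rw [show pvRank? "index.html" = some 0 from rfl] at h
    cases h; simp
  by_cases e1 : p = "public/index.html"
  · subst e1; rw [show pvRank? "public/index.html" = some 1 from rfl] at h
    cases h; simp
  by_cases e2 : p = "dist/index.html"
  · subst e2; rw [show pvRank? "dist/index.html" = some 2 from rfl] at h
    cases h; simp
  by_cases e3 : p = "src/index.html"
  · subst e3; rw [show pvRank? "src/index.html" = some 3 from rfl] at h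
    cases h; simp
  by_cases e4 : p = "static/index.html"
  · subst e4; rw [show pvRank? "static/index.html" = some 4 from rfl] at h
    cases h; simp
  rw [pvRank_get_none p e0 e1 e2 e3 e4] at h
  split at h
  · cases h; simp_all
  · cases h

-- pvStep returns one of its two inputs …
lemma pvStep_cases (acc : Option (Nat × String)) (k : String) :
    pvStep acc k = acc ∨ pvStep acc k = pvKey? k := by
  unfold pvStep pvKey?
  rcases hr : pvRank? k with _ | r <;> simp only [Option.map_none, Option.map_some]
  · exact Or.inl trivial
  · rcases acc with _ | ⟨br, bp⟩
    · exact Or.inr rfl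
    · dsimp only
      by_cases hif : r < br ∨ (r = br ∧ k < bp)
      · right; rw [if_pos hif]
      · left; rw [if_neg hif]

-- … and its result is ≤ both of them
lemma pvStep_le (acc : Option (Nat × String)) (k : String) (v : Nat × String)
    (h : pvStep acc k = some v) :
    (∀ x, acc = some x → pvLe v x) ∧ (∀ x, pvKey? k = some x → pvLe v x) := by
  unfold pvStep at h
  unfold pvKey?
  rcases hr : pvRank? k with _ | r <;> rw [hr] at h <;>
    simp only [Option.map_none, Option.map_some]
  · constructor
    · intro x hx; rw [hx] at h; cases h; exact pvLe_refl _
    · intro x hx; cases hx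
  · rcases acc with _ | ⟨br, bp⟩
    · cases h
      constructor
      · intro x hx; cases hx
      · intro x hx; cases hx; exact pvLe_refl _
    · dsimp only at h
      by_cases hif : r < br ∨ (r = br ∧ k < bp)
      · rw [if_pos hif] at h; cases h
        constructor
        · intro x hx; cases hx
          rcases hif with h' | ⟨h', h''⟩
          · exact Or.inl h'
          · exact Or.inr ⟨h', le_of_lt h''⟩
        · intro x hx; cases hx; exact pvLe_refl _
      · rw [if_neg hif] at h; cases h
        constructor
        · intro x hx; cases hx; exact pvLe_refl _
        · intro x hx; cases hx
          have h1 : ¬ r < br := fun hlt => hif (Or.inl hlt)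
          rcases Nat.lt_or_ge br r with hlt | hge
          · exact Or.inl hlt
          · have heq : r = br := le_antisymm hge (Nat.le_of_not_lt h1)
            have h2 : ¬ k < bp := fun hk => hif (Or.inr ⟨heq, hk⟩)
            exact Or.inr ⟨heq.symm, not_lt.mp h2⟩

lemma pvStep_eq_none (acc : Option (Nat × String)) (k : String)
    (h : pvStep acc k = none) : acc = none ∧ pvKey? k = none := by
  unfold pvStep at h
  unfold pvKey?
  rcases hr : pvRank? k with _ | r <;> rw [hr] at h <;>
    simp only [Option.map_none, Option.map_some]
  · exact ⟨h, trivial⟩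
  · rcases acc with _ | ⟨br, bp⟩
    · cases h
    · dsimp only at h
      by_cases hif : r < br ∨ (r = br ∧ k < bp)
      · rw [if_pos hif] at h; cases h
      · rw [if_neg hif] at h; cases h

lemma pvFold_none (keys : List String) :
    ∀ acc, keys.foldl pvStep acc = none ↔ (acc = none ∧ ∀ p ∈ keys, pvKey? p = none) := by
  induction keys with
  | nil => intro acc; simp
  | cons k t ih =>
    intro acc
    rw [List.foldl_cons, ih]
    constructor
    · rintro ⟨h1, h2⟩
      obtain ⟨ha, hk⟩ := pvStep_eq_none acc k h1
      refine ⟨ha, fun p hp => ?_⟩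
      rcases List.mem_cons.mp hp with rfl | hp'
      · exact hk
      · exact h2 p hp'
    · rintro ⟨ha, hall⟩
      have hk := hall k (List.mem_cons_self ..)
      have hrk : pvRank? k = none := by
        unfold pvKey? at hk
        exact Option.map_eq_none_iff.mp hk
      have hstep : pvStep acc k = none := by
        unfold pvStep; rw [hrk, ha]
      exact ⟨hstep, fun p hp => hall p (List.mem_cons_of_mem _ hp)⟩

lemma pvFold_some (keys : List String) :
    ∀ acc m, keys.foldl pvStep acc = some m →
      ((acc = some m ∨ ∃ p ∈ keys, pvKey? p = some m)
       ∧ (∀ x, acc = some x → pvLe m x)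
       ∧ (∀ p ∈ keys, ∀ x, pvKey? p = some x → pvLe m x)) := by
  induction keys with
  | nil =>
    intro acc m h
    simp only [List.foldl_nil] at h
    exact ⟨Or.inl h, fun x hx => by rw [h] at hx; cases hx; exact pvLe_refl _,
      fun p hp => by cases hp⟩
  | cons k t ih =>
    intro acc m h
    rw [List.foldl_cons] at h
    obtain ⟨hA, hB, hC⟩ := ih (pvStep acc k) m h
    refine ⟨?_, ?_, ?_⟩
    · rcases hA with hA | ⟨p, hp, hkey⟩
      · rcases pvStep_cases acc k with hc | hc
        · exact Or.inl (hc ▸ hA)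
        · exact Or.inr ⟨k, List.mem_cons_self .., hc ▸ hA⟩
      · exact Or.inr ⟨p, List.mem_cons_of_mem _ hp, hkey⟩
    · intro x hx
      rcases hv : pvStep acc k with _ | v
      · obtain ⟨ha, _⟩ := pvStep_eq_none acc k hv
        rw [ha] at hx; cases hx
      · exact pvLe_trans (hB v hv) ((pvStep_le acc k v hv).1 x hx)
    · intro p hp x hx
      rcases List.mem_cons.mp hp with rfl | hp'
      · rcases hv : pvStep acc p with _ | v
        · obtain ⟨_, hk⟩ := pvStep_eq_none acc p hv
          rw [hk] at hx; cases hx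
        · exact pvLe_trans (hB v hv) ((pvStep_le acc p v hv).2 x hx)
      · exact hC p hp' x hx

-- B's fold returns exactly the minimum-key qualified path
lemma pvFold_eq_of_min (keys : List String) (m : Nat × String)
    (hmem : ∃ p ∈ keys, pvKey? p = some m)
    (hmin : ∀ p ∈ keys, ∀ x, pvKey? p = some x → pvLe m x) :
    keys.foldl pvStep none = some m := by
  rcases h : keys.foldl pvStep none with _ | m'
  · obtain ⟨q, hq, hqk⟩ := hmem
    have := ((pvFold_none keys none).mp h).2 q hq
    rw [this] at hqk; cases hqk
  · obtain ⟨hA, _, hC⟩ := pvFold_some keys none m' h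
    obtain ⟨q, hq, hqk⟩ := hmem
    have h2 : pvLe m' m := hC q hq m hqk
    rcases hA with hA | ⟨p, hp, hkey⟩
    · cases hA
    · have h1 : pvLe m m' := hmin p hp m' hkey
      rw [pvLe_antisymm h2 h1]

-- A's second loop: find? on the sorted keys is the lexicographically least good key
lemma pvSorted_find_min (keys : List String) (m : String)
    (h : (PySem.List.sorted keys (fun x => x)).find? pvGood = some m) :
    pvGood m = true ∧ m ∈ keys ∧ ∀ p ∈ keys, pvGood p = true → m ≤ p := by
  rw [List.find?_eq_some_iff_append] at h
  obtain ⟨hgood, as, bs, heq, hall⟩ := h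
  have hmemS : m ∈ PySem.List.sorted keys (fun x => x) := by rw [heq]; simp
  refine ⟨hgood, (PySem.List.mem_sorted keys (fun x => x) false m).mp hmemS, ?_⟩
  intro p hpk hpg
  have hpS : p ∈ PySem.List.sorted keys (fun x => x) :=
    (PySem.List.mem_sorted keys (fun x => x) false p).mpr hpk
  rw [heq] at hpS
  have hpair := PySem.List.sorted_pairwise keys (fun x => x)
  rw [heq] at hpair
  rcases List.mem_append.mp hpS with hin | hin
  · have := hall p hin; simp [hpg] at this
  · rcases List.mem_cons.mp hin with rfl | hin'
    · exact le_refl _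
    · exact List.rel_of_pairwise_cons (List.pairwise_append.mp hpair).2.1 hin'

-- the five preferred names have pairwise distinct ranks below 5
lemma pvRank_unique (p q : String) (r : Nat) (hr : r < 5)
    (hp : pvRank? p = some r) (hq : pvRank? q = some r) : p = q := by
  rcases pvRank_cases p r hp with ⟨h1,h2⟩|⟨h1,h2⟩|⟨h1,h2⟩|⟨h1,h2⟩|⟨h1,h2⟩|⟨h1,h2⟩ <;>
    rcases pvRank_cases q r hq with ⟨g1,g2⟩|⟨g1,g2⟩|⟨g1,g2⟩|⟨g1,g2⟩|⟨g1,g2⟩|⟨g1,g2⟩ <;>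
    simp_all

-- the preferred-candidate case
lemma pvCase_pref (keys : List String) (k : Nat) (c : String)
    (hk : pvRank? c = some k) (hc : c ∈ keys)
    (huniq : ∀ p, pvRank? p = some k → p = c)
    (hprev : ∀ p r, pvRank? p = some r → r < k → p ∉ keys) :
    keys.foldl pvStep none = some (k, c) := by
  apply pvFold_eq_of_min
  · exact ⟨c, hc, by unfold pvKey?; rw [hk]; rfl⟩
  · intro p hp x hx
    unfold pvKey? at hx
    rcases hrp : pvRank? p with _ | r <;> rw [hrp] at hx
    · cases hx
    · cases hx
      rcases Nat.lt_trichotomy r k with hlt | heq | hgt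
      · exact absurd hp (hprev p r hrp hlt)
      · have := huniq p (heq ▸ hrp)
        subst this; subst heq; exact pvLe_refl _
      · exact Or.inl hgt

-- no path of rank below j is a key, given the first j preferred names are absent
lemma pvPrev (keys : List String) (j : Nat)
    (h0 : 0 < j → "index.html" ∉ keys)
    (h1 : 1 < j → "public/index.html" ∉ keys)
    (h2 : 2 < j → "dist/index.html" ∉ keys)
    (h3 : 3 < j → "src/index.html" ∉ keys)
    (h4 : 4 < j → "static/index.html" ∉ keys)
    (hj : j ≤ 5) :
    ∀ p r, pvRank? p = some r → r < j → p ∉ keys := by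
  intro p r hrp hlt hpk
  rcases pvRank_cases p r hrp with ⟨ha,hb⟩|⟨ha,hb⟩|⟨ha,hb⟩|⟨ha,hb⟩|⟨ha,hb⟩|⟨ha,hb⟩
  · exact h0 (by omega) (hb ▸ hpk)
  · exact h1 (by omega) (hb ▸ hpk)
  · exact h2 (by omega) (hb ▸ hpk)
  · exact h3 (by omega) (hb ▸ hpk)
  · exact h4 (by omega) (hb ▸ hpk)
  · omega

lemma pvCore (keys : List String) :
    (match pvCandidates.find? (fun c => keys.contains c) with
     | some c => some c
     | none => (PySem.List.sorted keys (fun x => x)).find? pvGood)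
      = (keys.foldl pvStep none).map Prod.snd := by
  by_cases c0 : "index.html" ∈ keys
  · have hf : pvCandidates.find? (fun c => keys.contains c) = some "index.html" := by
      simp [pvCandidates, c0]
    rw [hf]; dsimp only
    rw [pvCase_pref keys 0 "index.html" rfl c0
      (fun p hp => pvRank_unique p "index.html" 0 (by omega) hp rfl)
      (pvPrev keys 0 (fun h => absurd h (by omega)) (fun h => absurd h (by omega))
        (fun h => absurd h (by omega)) (fun h => absurd h (by omega))
        (fun h => absurd h (by omega)) (by omega))]
    rfl
  by_cases c1 : "public/index.html" ∈ keys
  · have hf : pvCandidates.find? (fun c => keys.contains c) = some "public/index.html" := by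
      simp [pvCandidates, List.find?, c0, c1]
    rw [hf]; dsimp only
    rw [pvCase_pref keys 1 "public/index.html" rfl c1
      (fun p hp => pvRank_unique p "public/index.html" 1 (by omega) hp rfl)
      (pvPrev keys 1 (fun _ => c0) (fun h => absurd h (by omega))
        (fun h => absurd h (by omega)) (fun h => absurd h (by omega))
        (fun h => absurd h (by omega)) (by omega))]
    rfl
  by_cases c2 : "dist/index.html" ∈ keys
  · have hf : pvCandidates.find? (fun c => keys.contains c) = some "dist/index.html" := by
      simp [pvCandidates, List.find?, c0, c1, c2]
    rw [hf]; dsimp only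
    rw [pvCase_pref keys 2 "dist/index.html" rfl c2
      (fun p hp => pvRank_unique p "dist/index.html" 2 (by omega) hp rfl)
      (pvPrev keys 2 (fun _ => c0) (fun _ => c1)
        (fun h => absurd h (by omega)) (fun h => absurd h (by omega))
        (fun h => absurd h (by omega)) (by omega))]
    rfl
  by_cases c3 : "src/index.html" ∈ keys
  · have hf : pvCandidates.find? (fun c => keys.contains c) = some "src/index.html" := by
      simp [pvCandidates, List.find?, c0, c1, c2, c3]
    rw [hf]; dsimp only
    rw [pvCase_pref keys 3 "src/index.html" rfl c3
      (fun p hp => pvRank_unique p "src/index.html" 3 (by omega) hp rfl)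
      (pvPrev keys 3 (fun _ => c0) (fun _ => c1) (fun _ => c2)
        (fun h => absurd h (by omega)) (fun h => absurd h (by omega)) (by omega))]
    rfl
  by_cases c4 : "static/index.html" ∈ keys
  · have hf : pvCandidates.find? (fun c => keys.contains c) = some "static/index.html" := by
      simp [pvCandidates, List.find?, c0, c1, c2, c3, c4]
    rw [hf]; dsimp only
    rw [pvCase_pref keys 4 "static/index.html" rfl c4
      (fun p hp => pvRank_unique p "static/index.html" 4 (by omega) hp rfl)
      (pvPrev keys 4 (fun _ => c0) (fun _ => c1) (fun _ => c2) (fun _ => c3)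
        (fun h => absurd h (by omega)) (by omega))]
    rfl
  · have hf : pvCandidates.find? (fun c => keys.contains c) = none := by
      simp [pvCandidates, List.find?, c0, c1, c2, c3, c4]
    rw [hf]; dsimp only
    have hne : ∀ p ∈ keys, pvRank? p = if pvGood p then some 5 else none := fun p hp =>
      pvRank_get_none p (fun e => c0 (e ▸ hp)) (fun e => c1 (e ▸ hp)) (fun e => c2 (e ▸ hp))
        (fun e => c3 (e ▸ hp)) (fun e => c4 (e ▸ hp))
    rcases hs : (PySem.List.sorted keys (fun x => x)).find? pvGood with _ | m
    · have hfold : keys.foldl pvStep none = none := by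
        rw [pvFold_none]
        refine ⟨rfl, fun p hp => ?_⟩
        have hb : pvGood p = false := by
          have := List.find?_eq_none.mp hs p
            ((PySem.List.mem_sorted keys (fun x => x) false p).mpr hp)
          simpa using this
        unfold pvKey?
        rw [hne p hp]
        simp [hb]
      rw [hfold]
      rfl
    · obtain ⟨hg, hm, hmin⟩ := pvSorted_find_min keys m hs
      have hfold : keys.foldl pvStep none = some (5, m) := by
        apply pvFold_eq_of_min
        · refine ⟨m, hm, ?_⟩
          unfold pvKey?
          rw [hne m hm]
          simp [hg]
        · intro p hp x hx
          unfold pvKey? at hx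
          rw [hne p hp] at hx
          by_cases hgp : pvGood p = true
          · simp only [hgp, if_true, Option.map_some] at hx
            cases hx
            exact Or.inr ⟨rfl, hmin p hp hgp⟩
          · simp [hgp] at hx
      rw [hfold]
      rfl

-- ===== VERDICT (by name: the statement is the Claim_ definition above) =====
theorem find_html_entry_py_spec : Claim_equal_find_html_entry_py := by
  intro ft _
  show find_html_entry_py ft = find_html_entry_py_alt ft
  have h := pvCore (ft.map Prod.fst)
  simpa [find_html_entry_py, find_html_entry_py_alt, pvGood] using h
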